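-- pv_equiv track=rewrite | github.com/fernandobusta/CA117 | decode_112.py | breaker
-- ===== SOURCE A (Python) =====
-- def breaker(line):
--     vowel = ['a', 'e', 'i', 'o', 'u']
--     i = 0
--     while i < len(line):
--         if line[i] in vowel:
--             line = line[:i] + line[i + 2:]
--         i += 1
--     return line
-- ===== SOURCE B (Python) =====
-- def breaker(line):
--     out = []
--     n = len(line)
--     k = 0
--     while k < n:
--         c = line[k]
--         if c in 'aeiou':
--             # drop the vowel and the next char; the char after that is
--             # kept without being examined (A increments i past it)
--             if k + 2 < n:
--                 out.append(line[k + 2])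
--             k += 3
--         else:
--             out.append(c)
--             k += 1
--     return ''.join(out)
-- ===== Notes on version B (the rewrite author's own statement) =====
-- stated objective: faster
-- what changed: Replaces A's repeated whole-string slice-and-concatenate inside the scan with a single left-to-right pass over the fixed input that appends to an output list (vowel: skip it and the next char, emit the char two ahead unexamined and jump the pointer by 3).
import Mathlib
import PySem

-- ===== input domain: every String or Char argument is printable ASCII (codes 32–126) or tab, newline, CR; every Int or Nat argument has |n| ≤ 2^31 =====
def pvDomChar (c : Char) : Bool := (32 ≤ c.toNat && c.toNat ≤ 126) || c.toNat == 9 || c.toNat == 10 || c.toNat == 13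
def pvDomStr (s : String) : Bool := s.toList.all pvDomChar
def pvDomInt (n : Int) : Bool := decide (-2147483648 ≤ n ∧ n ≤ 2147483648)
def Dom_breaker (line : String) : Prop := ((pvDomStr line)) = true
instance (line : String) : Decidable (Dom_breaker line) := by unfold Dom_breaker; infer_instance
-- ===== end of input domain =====

-- B replaces A's repeated slice-and-reconcatenate of the whole string with a
-- single left-to-right pass over the fixed input that builds the output once.

-- ===== PORT A =====
-- A's while loop: i scans the (reassigned) string; on a vowel, line[:i] + line[i+2:]
-- removes two characters (Python slices with nonnegative bounds are exactly take/drop).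
def breakerLoop (s : List Char) (i : Nat) : List Char :=
  if h : i < s.length then
    if s[i] ∈ ['a', 'e', 'i', 'o', 'u'] then
      breakerLoop (s.take i ++ s.drop (i + 2)) (i + 1)
    else
      breakerLoop s (i + 1)
  else
    s
termination_by s.length - i
decreasing_by
  · simp [List.length_take]; omega
  · omega

def breaker (line : String) : String := String.ofList (breakerLoop line.toList 0)

-- ===== PORT B =====
-- Source B's single pass: pointer k over the fixed input; on a vowel drop it and the
-- next char, emit the char two ahead (if any) without examining it, advance k by 3.
def altLoop (s : List Char) (k : Nat) : List Char :=
  if h : k < s.length then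
    if s[k] ∈ ['a', 'e', 'i', 'o', 'u'] then
      (match s[k + 2]? with
       | some d => [d]
       | none => []) ++ altLoop s (k + 3)
    else
      s[k] :: altLoop s (k + 1)
  else
    []
termination_by s.length - k

def breaker_alt (line : String) : String := String.ofList (altLoop line.toList 0)

-- ===== PRECONDITION & SPEC =====
def Spec_breaker (line : String) (out : String) : Prop := out = breaker_alt line
instance (line : String) (out : String) : Decidable (Spec_breaker line out) := by unfold Spec_breaker; infer_instance

-- ===== CLAIM (what is proved, stated in full; the proofs are below) =====
def Claim_equal_breaker : Prop := ∀ (line : String), Dom_breaker line → Spec_breaker line (breaker line)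

-- ===== LEMMAS AND PROOFS =====

-- structural (cons-by-cons) version of B's pass, used only inside the proofs
def altList : List Char → List Char
  | [] => []
  | c :: rest =>
    if c ∈ ['a', 'e', 'i', 'o', 'u'] then
      match rest with
      | [] => []
      | [_] => []
      | _ :: d :: rest' => d :: altList rest'
    else
      c :: altList rest

theorem altLoop_eq_altList (s : List Char) (k : Nat) :
    altLoop s k = altList (s.drop k) := by
  fun_induction altLoop s k with
  | case1 k h hv ih =>
    rw [List.drop_eq_getElem_cons h]
    have hl : (s.drop (k+1)).length = s.length - (k+1) := List.length_drop
    rcases hrest : s.drop (k+1) with _ | ⟨x, _ | ⟨d, r'⟩⟩ <;> rw [hrest] at hl <;> simp at hl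
    · have h2 : s[k+2]? = none := by rw [List.getElem?_eq_none_iff]; omega
      have h3 : s.drop (k+3) = [] := List.drop_eq_nil_of_le (by omega)
      rw [ih, h2, h3, altList.eq_2, if_pos hv]; rfl
    · have h2 : s[k+2]? = none := by rw [List.getElem?_eq_none_iff]; omega
      have h3 : s.drop (k+3) = [] := List.drop_eq_nil_of_le (by omega)
      rw [ih, h2, h3, altList.eq_3, if_pos hv]; rfl
    · have h1 : s.drop (k+2) = d :: r' := by
        have : s.drop (k+2) = (s.drop (k+1)).drop 1 := by rw [List.drop_drop]
        rw [this, hrest]; rfl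
      have h2 : s[k+2]? = some d := by
        have h4 : (s.drop (k+2))[0]? = s[k+2+0]? := List.getElem?_drop
        rw [h1] at h4; simpa using h4.symm
      have h3 : s.drop (k+3) = r' := by
        have : s.drop (k+3) = (s.drop (k+2)).drop 1 := by rw [List.drop_drop]
        rw [this, h1]; rfl
      rw [ih, h2, h3, altList.eq_4, if_pos hv]; rfl
  | case2 k h hv ih =>
    rw [List.drop_eq_getElem_cons h]
    rcases hrest : s.drop (k+1) with _ | ⟨x, _ | ⟨d, r'⟩⟩ <;>
      rw [← hrest, ih] <;> rw [hrest]
    · rw [altList.eq_2, if_neg hv]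
    · rw [altList.eq_3, if_neg hv]
    · rw [altList.eq_4, if_neg hv]
  | case3 k h =>
    rw [List.drop_eq_nil_of_le (by omega), altList]

theorem altList_cons_nv (c : Char) (rest : List Char) (hc : c ∉ ['a', 'e', 'i', 'o', 'u']) :
    altList (c :: rest) = c :: altList rest := by
  rcases rest with _ | ⟨x, _ | ⟨d, r'⟩⟩
  · rw [altList.eq_2, if_neg hc]
  · rw [altList.eq_3, if_neg hc]
  · rw [altList.eq_4, if_neg hc]

theorem breakerLoop_eq (s : List Char) (i : Nat) :
    breakerLoop s i = s.take i ++ altList (s.drop i) := by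
  fun_induction breakerLoop s i with
  | case1 s i h hv ih =>
    have hti : (s.take i).length = i := by simp [List.length_take]; omega
    have hT : (s.take i ++ s.drop (i+2)).take (i+1)
        = s.take i ++ (s.drop (i+2)).take 1 := by
      rw [(by omega : i + 1 = (s.take i).length + 1), List.take_length_add_append]
    have hD : (s.take i ++ s.drop (i+2)).drop (i+1) = s.drop (i+3) := by
      rw [(by omega : i + 1 = (s.take i).length + 1), List.drop_length_add_append,
          List.drop_drop]
    rw [ih, hT, hD, List.drop_eq_getElem_cons h]
    have hl : (s.drop (i+1)).length = s.length - (i+1) := List.length_drop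
    rcases hrest : s.drop (i+1) with _ | ⟨x, _ | ⟨d, r'⟩⟩ <;> rw [hrest] at hl <;> simp at hl
    · have h2 : s.drop (i+2) = [] := List.drop_eq_nil_of_le (by omega)
      have h3 : s.drop (i+3) = [] := List.drop_eq_nil_of_le (by omega)
      rw [h2, h3, altList.eq_2, if_pos hv]; simp [altList]
    · have h2 : s.drop (i+2) = [] := List.drop_eq_nil_of_le (by omega)
      have h3 : s.drop (i+3) = [] := List.drop_eq_nil_of_le (by omega)
      rw [h2, h3, altList.eq_3, if_pos hv]; simp [altList]
    · have h2 : s.drop (i+2) = d :: r' := by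
        have : s.drop (i+2) = (s.drop (i+1)).drop 1 := by rw [List.drop_drop]
        rw [this, hrest]; rfl
      have h3 : s.drop (i+3) = r' := by
        have : s.drop (i+3) = (s.drop (i+2)).drop 1 := by rw [List.drop_drop]
        rw [this, h2]; rfl
      rw [h2, h3, altList.eq_4, if_pos hv]; simp
  | case2 s i h hv ih =>
    rw [ih, List.drop_eq_getElem_cons h, altList_cons_nv _ _ hv]
    have ht : List.take (i+1) s = List.take i s ++ [s[i]] := by
      rw [List.take_add_one, List.getElem?_eq_getElem h]; rfl
    rw [ht, List.append_assoc]
    rfl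
  | case3 s i h =>
    rw [List.drop_eq_nil_of_le (by omega), List.take_of_length_le (by omega), altList]
    simp

-- ===== VERDICT (by name: the statement is the Claim_ definition above) =====
theorem breaker_spec : Claim_equal_breaker := by
  intro line _
  unfold Spec_breaker breaker breaker_alt
  rw [breakerLoop_eq, altLoop_eq_altList]
  simp
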